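-- pv_equiv track=rewrite | github.com/DEEP-PolyU/KAEL_WSDM23 | utils.py | same_elements4
-- ===== SOURCE A (Python) =====
-- def same_elements4(a, b, c, d):
--     length = len(a)
--     ab = []
--     cd = []
--     overlaps = []
--     for i in range(length):
--         for j in range(length):
--             if a[i] == b[j]:
--                 ab.append(a[i])
--                 break
--     for i in range(length):
--         for j in range(length):
--             if c[i] == d[j]:
--                 cd.append(c[i])
--                 break
--     for i in range(len(ab)):
--         for j in range(len(cd)):
--             if ab[i] == cd[j]:
--                 overlaps.append(ab[i])
--                 break
--     return overlaps
-- ===== SOURCE B (Python) =====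
-- def same_elements4(a, b, c, d):
--     # single pass over a: keep the elements (in a's order, with duplicates)
--     # that occur in b, c and d
--     return [x for x in a if x in b and x in c and x in d]
-- ===== Notes on version B (the rewrite author's own statement) =====
-- stated objective: simpler
-- what changed: Replaces A's three quadratic index-loop phases with intermediate lists ab/cd by one comprehension over a filtering on membership in b, c and d.
-- intended difference: On inputs where some element of a occurs in b, c and d but in one of them only at positions >= len(a), A returns a list silently dropping that element (its loops never look past index len(a)-1) while B keeps it; membership should not depend on position, so B's value is the intended one. — e.g. on same_elements4([1], [2, 1], [1], [1]): A returns [], B returns [1]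
import Mathlib
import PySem

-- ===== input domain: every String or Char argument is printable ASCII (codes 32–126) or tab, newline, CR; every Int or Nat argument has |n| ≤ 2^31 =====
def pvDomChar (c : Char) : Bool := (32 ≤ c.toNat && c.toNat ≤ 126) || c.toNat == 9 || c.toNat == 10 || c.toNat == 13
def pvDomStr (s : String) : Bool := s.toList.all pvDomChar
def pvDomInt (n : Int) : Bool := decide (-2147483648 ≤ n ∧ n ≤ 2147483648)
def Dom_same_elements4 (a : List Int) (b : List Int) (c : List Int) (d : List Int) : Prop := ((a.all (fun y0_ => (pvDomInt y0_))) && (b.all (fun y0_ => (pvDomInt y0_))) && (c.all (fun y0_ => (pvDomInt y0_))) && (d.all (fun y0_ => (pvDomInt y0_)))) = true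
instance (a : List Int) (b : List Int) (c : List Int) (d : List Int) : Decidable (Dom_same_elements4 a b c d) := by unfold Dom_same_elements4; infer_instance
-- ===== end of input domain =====

-- B replaces A's three quadratic index-loop phases (and the intermediate lists ab/cd)
-- with one comprehension over a filtering on membership in b, c and d (objective: simpler).

-- ===== PORT A =====
-- one "for i in range(nx): for j in range(ny): if xs[i] == ys[j]: out.append(xs[i]); break" phase
def pvScanPhase (xs ys : List Int) (nx ny : Int) : List Int :=
  (PySem.List.pyRange 0 nx 1).foldl
    (fun acc i =>
      if (PySem.List.pyRange 0 ny 1).any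
           (fun j => PySem.List.pyGetD xs i 0 == PySem.List.pyGetD ys j 0) then
        acc ++ [PySem.List.pyGetD xs i 0]
      else acc) []

def same_elements4 (a : List Int) (b : List Int) (c : List Int) (d : List Int) : List Int :=
  let length : Int := a.length
  let ab := pvScanPhase a b length length
  let cd := pvScanPhase c d length length
  pvScanPhase ab cd (ab.length : Int) (cd.length : Int)

-- ===== PORT B =====
def same_elements4_alt (a : List Int) (b : List Int) (c : List Int) (d : List Int) : List Int :=
  a.filter (fun x => b.contains x && c.contains x && d.contains x)

-- ===== PRECONDITION & SPEC =====
-- Pre_ is exactly the region where the Python A returns normally: A indexes b, c and d with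
-- indices below len(a), so it raises IndexError when len(c) < len(a), when len(b) < len(a) and
-- some element of a has no earlier match in b, or when len(d) < len(a) and some element of
-- c[:len(a)] has no earlier match in d.
def Pre_same_elements4 (a : List Int) (b : List Int) (c : List Int) (d : List Int) : Prop :=
  a.length ≤ c.length ∧
  (a.length ≤ b.length ∨ ∀ x ∈ a, x ∈ b) ∧
  (a.length ≤ d.length ∨ ∀ y ∈ c.take a.length, y ∈ d)
instance (a : List Int) (b : List Int) (c : List Int) (d : List Int) : Decidable (Pre_same_elements4 a b c d) := by unfold Pre_same_elements4; infer_instance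
def pvWitness_same_elements4 : List Int × List Int × List Int × List Int :=
  ([1, 2, 3], [3, 1, 4], [1, 5, 3], [3, 9, 1])

-- On inputs where some element of a occurs in b, c and d but, in one of them, only at a position
-- ≥ len(a), A drops it (its loops never look past index len(a)-1) while B keeps it; membership
-- should not depend on position, so B's value is the intended one.
def D_same_elements4 (a : List Int) (b : List Int) (c : List Int) (d : List Int) : Prop :=
  ∃ x ∈ a, (x ∈ b ∧ x ∈ c ∧ x ∈ d) ∧
    ¬ (x ∈ b.take a.length ∧ x ∈ c.take a.length ∧ x ∈ d.take a.length)
instance (a : List Int) (b : List Int) (c : List Int) (d : List Int) : Decidable (D_same_elements4 a b c d) := by unfold D_same_elements4; infer_instance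

def Spec_same_elements4 (a : List Int) (b : List Int) (c : List Int) (d : List Int) (out : List Int) : Prop := ¬ D_same_elements4 a b c d → out = same_elements4_alt a b c d
instance (a : List Int) (b : List Int) (c : List Int) (d : List Int) (out : List Int) : Decidable (Spec_same_elements4 a b c d out) := by unfold Spec_same_elements4; infer_instance

def pvDiffWitness_same_elements4 : List Int × List Int × List Int × List Int :=
  ([1], [2, 1], [1], [1])
def pvDiffWitnessOut_same_elements4 : (List Int) × (List Int) := ([], [1])

-- ===== CLAIM (what is proved, stated in full; the proofs are below) =====
def Claim_unchanged_same_elements4 : Prop := ∀ (a : List Int) (b : List Int) (c : List Int) (d : List Int), Dom_same_elements4 a b c d → Pre_same_elements4 a b c d → Spec_same_elements4 a b c d (same_elements4 a b c d)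
def Claim_changed_same_elements4 : Prop := Dom_same_elements4 (pvDiffWitness_same_elements4.1) (pvDiffWitness_same_elements4.2.1) (pvDiffWitness_same_elements4.2.2.1) (pvDiffWitness_same_elements4.2.2.2) ∧ Pre_same_elements4 (pvDiffWitness_same_elements4.1) (pvDiffWitness_same_elements4.2.1) (pvDiffWitness_same_elements4.2.2.1) (pvDiffWitness_same_elements4.2.2.2) ∧ D_same_elements4 (pvDiffWitness_same_elements4.1) (pvDiffWitness_same_elements4.2.1) (pvDiffWitness_same_elements4.2.2.1) (pvDiffWitness_same_elements4.2.2.2) ∧ same_elements4 (pvDiffWitness_same_elements4.1) (pvDiffWitness_same_elements4.2.1) (pvDiffWitness_same_elements4.2.2.1) (pvDiffWitness_same_elements4.2.2.2) = pvDiffWitnessOut_same_elements4.1 ∧ same_elements4_alt (pvDiffWitness_same_elements4.1) (pvDiffWitness_same_elements4.2.1) (pvDiffWitness_same_elements4.2.2.1) (pvDiffWitness_same_elements4.2.2.2) = pvDiffWitnessOut_same_elements4.2 ∧ pvDiffWitnessOut_same_elements4.1 ≠ pvDiffWitnessOut_same_elements4.2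
def Claim_exact_same_elements4 : Prop := ∀ (a : List Int) (b : List Int) (c : List Int) (d : List Int), Dom_same_elements4 a b c d → Pre_same_elements4 a b c d → D_same_elements4 a b c d → same_elements4 a b c d ≠ same_elements4_alt a b c d

-- ===== LEMMAS AND PROOFS =====

-- reading an index < nx ≤ len xs reads the same element of xs.take nx
lemma pyGetD_take_eq (xs : List Int) (nx : Nat) (i : Int) (h0 : 0 ≤ i) (h1 : i < (nx : Int))
    (hx : nx ≤ xs.length) : PySem.List.pyGetD xs i 0 = PySem.List.pyGetD (xs.take nx) i 0 := by
  have hilen : i < (xs.length : Int) := lt_of_lt_of_le h1 (by exact_mod_cast hx)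
  have hilen' : i < ((xs.take nx).length : Int) := by
    rw [List.length_take]; omega
  rw [PySem.List.pyGetD_eq_getElem xs 0 h0 hilen,
      PySem.List.pyGetD_eq_getElem (xs.take nx) 0 h0 hilen', List.getElem_take]

-- the inner break-loop over range(len ys) is membership in ys
lemma any_pyRange_pyGetD (ys : List Int) (v : Int) :
    (PySem.List.pyRange 0 (ys.length : Int) 1).any
      (fun j => v == PySem.List.pyGetD ys j 0) = ys.contains v := by
  have h : (fun j => v == PySem.List.pyGetD ys j 0)
      = ((fun y => v == y) ∘ (fun j => PySem.List.pyGetD ys j 0)) := rfl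
  rw [h, ← List.any_map, PySem.List.map_pyGetD_pyRange_zero']
  simp [List.any_beq]

-- the inner break-loop over range(ny) is membership in ys.take ny, provided ny stays in range
-- or v itself occurs in ys (the two ways the Python loop cannot raise)
lemma inner_any_eq_contains_take (ys : List Int) (ny : Nat) (v : Int)
    (h : ny ≤ ys.length ∨ v ∈ ys) :
    (PySem.List.pyRange 0 (ny : Int) 1).any (fun j => v == PySem.List.pyGetD ys j 0)
      = (ys.take ny).contains v := by
  by_cases hlen : ny ≤ ys.length
  · have hcong : ∀ j ∈ PySem.List.pyRange 0 (ny : Int) 1,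
        (v == PySem.List.pyGetD ys j 0) = (v == PySem.List.pyGetD (ys.take ny) j 0) := by
      intro j hj
      rw [PySem.List.mem_pyRange_one] at hj
      rw [pyGetD_take_eq ys ny j hj.1 hj.2 hlen]
    rw [PySem.List.any_congr_mem hcong,
        show ((ny : Int)) = ((ys.take ny).length : Int) by rw [List.length_take]; omega,
        any_pyRange_pyGetD]
  · have hv : v ∈ ys := h.resolve_left hlen
    have htake : ys.take ny = ys := List.take_of_length_le (by omega)
    rw [htake]
    have hct : ys.contains v = true := by simp [List.contains_eq_mem, hv]
    rw [hct, List.any_eq_true]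
    obtain ⟨j, hj, hvj⟩ := List.mem_iff_getElem.mp hv
    refine ⟨(j : Int), ?_, ?_⟩
    · rw [PySem.List.mem_pyRange_one]; constructor <;> omega
    · rw [PySem.List.pyGetD_eq_getElem ys 0 (by omega) (by exact_mod_cast hj)]
      simp [Int.toNat_natCast, hvj]

-- one phase is a filter of xs.take nx by membership in ys.take ny
lemma pvScanPhase_eq_filter_take (xs ys : List Int) (nx ny : Nat)
    (hx : nx ≤ xs.length)
    (hmem : ∀ x ∈ xs.take nx, ny ≤ ys.length ∨ x ∈ ys) :
    pvScanPhase xs ys (nx : Int) (ny : Int)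
      = (xs.take nx).filter (fun x => (ys.take ny).contains x) := by
  unfold pvScanPhase
  have hcong : ∀ (acc : List Int), ∀ i ∈ PySem.List.pyRange 0 (nx : Int) 1,
      (fun acc i =>
        if (PySem.List.pyRange 0 (ny : Int) 1).any
             (fun j => PySem.List.pyGetD xs i 0 == PySem.List.pyGetD ys j 0) then
          acc ++ [PySem.List.pyGetD xs i 0]
        else acc) acc i
      = (fun acc i =>
          if (PySem.List.pyRange 0 (ny : Int) 1).any
               (fun j => PySem.List.pyGetD (xs.take nx) i 0 == PySem.List.pyGetD ys j 0) then
            acc ++ [PySem.List.pyGetD (xs.take nx) i 0]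
          else acc) acc i := by
    intro acc i hi
    rw [PySem.List.mem_pyRange_one] at hi
    simp only [pyGetD_take_eq xs nx i hi.1 hi.2 hx]
  rw [PySem.List.foldl_congr_mem _ _ _ _ hcong,
      show ((nx : Int)) = ((xs.take nx).length : Int) by rw [List.length_take]; omega,
      PySem.List.foldl_pyRange_zero_pyGetD' (xs.take nx) 0
        (fun acc v =>
          if (PySem.List.pyRange 0 (ny : Int) 1).any
               (fun j => v == PySem.List.pyGetD ys j 0) then acc ++ [v] else acc) [],
      PySem.List.foldl_append_if_eq_filter]
  rw [List.nil_append]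
  exact List.filter_congr (fun x hxmem => inner_any_eq_contains_take ys ny x (hmem x hxmem))

lemma contains_filter_int (c d : List Int) (x : Int) :
    (c.filter (fun y => d.contains y)).contains x
      = (c.contains x && d.contains x) := by
  rw [Bool.eq_iff_iff]
  simp only [List.any_filter, List.contains_eq_any_beq, List.any_eq_true, Bool.and_eq_true,
    beq_iff_eq]
  aesop

-- characterisation of A on its whole no-raise region: filter a by membership in the truncations
lemma same_elements4_char (a b c d : List Int) (hpre : Pre_same_elements4 a b c d) :
    same_elements4 a b c d
      = a.filter (fun x => (b.take a.length).contains x &&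
          ((c.take a.length).contains x && (d.take a.length).contains x)) := by
  obtain ⟨hc, hb, hd⟩ := hpre
  unfold same_elements4
  simp only
  have h1 : pvScanPhase a b (a.length : Int) (a.length : Int)
      = a.filter (fun x => (b.take a.length).contains x) := by
    have := pvScanPhase_eq_filter_take a b a.length a.length (le_refl _)
      (by intro x hx; rcases hb with h | h
          · exact Or.inl h
          · exact Or.inr (h x (List.mem_of_mem_take hx)))
    rwa [List.take_of_length_le (le_refl _)] at this
  have h2 : pvScanPhase c d (a.length : Int) (a.length : Int)
      = (c.take a.length).filter (fun y => (d.take a.length).contains y) := by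
    apply pvScanPhase_eq_filter_take c d a.length a.length hc
    intro y hy
    rcases hd with h | h
    · exact Or.inl h
    · exact Or.inr (h y hy)
  rw [h1, h2]
  have h3 := pvScanPhase_eq_filter_take
    (a.filter (fun x => (b.take a.length).contains x))
    ((c.take a.length).filter (fun y => (d.take a.length).contains y))
    (a.filter (fun x => (b.take a.length).contains x)).length
    ((c.take a.length).filter (fun y => (d.take a.length).contains y)).length
    (le_refl _) (by intro x _; exact Or.inl (le_refl _))
  rw [List.take_of_length_le (le_refl _), List.take_of_length_le (le_refl _)] at h3
  rw [h3, List.filter_filter]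
  exact List.filter_congr (by intro x _; rw [contains_filter_int]; ac_rfl)

-- the take-membership predicate implies the full-membership predicate
lemma take_pred_imp (a b c d : List Int) (x : Int)
    (h : ((b.take a.length).contains x &&
          ((c.take a.length).contains x && (d.take a.length).contains x)) = true) :
    (b.contains x && c.contains x && d.contains x) = true := by
  simp only [Bool.and_eq_true, List.contains_eq_mem, decide_eq_true_eq] at h ⊢
  exact ⟨⟨List.mem_of_mem_take h.1, List.mem_of_mem_take h.2.1⟩, List.mem_of_mem_take h.2.2⟩

-- a filter by a strictly weaker predicate (witnessed at one element) is strictly longer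
lemma length_filter_lt_of_witness (l : List Int) (p q : Int → Bool)
    (himp : ∀ x ∈ l, q x = true → p x = true)
    (x0 : Int) (hx0 : x0 ∈ l) (hp : p x0 = true) (hq : q x0 = false) :
    (l.filter q).length < (l.filter p).length := by
  induction l with
  | nil => cases hx0
  | cons y t ih =>
    have himp' : ∀ x ∈ t, q x = true → p x = true :=
      fun x hx => himp x (List.mem_cons_of_mem y hx)
    have hle : (t.filter q).length ≤ (t.filter p).length := by
      rw [← List.countP_eq_length_filter, ← List.countP_eq_length_filter]
      exact List.countP_mono_left himp'
    rcases List.mem_cons.mp hx0 with rfl | hx0t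
    · simp [hp, hq]
      omega
    · have hlt := ih himp' hx0t
      by_cases hqy : q y = true
      · have hpy : p y = true := himp y List.mem_cons_self hqy
        simp [hqy, hpy]
        omega
      · by_cases hpy : p y = true
        · simp [hqy, hpy]
          omega
        · simp [hqy, hpy]
          omega

-- ===== VERDICT (by name: the statement is the Claim_ definition above) =====
theorem same_elements4_spec : Claim_unchanged_same_elements4 := by
  intro a b c d _ hpre hnD
  rw [same_elements4_char a b c d hpre]
  unfold same_elements4_alt
  apply List.filter_congr
  intro x hx
  unfold D_same_elements4 at hnD
  push Not at hnD
  rw [Bool.eq_iff_iff]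
  simp only [Bool.and_eq_true, List.contains_eq_mem, decide_eq_true_eq]
  constructor
  · rintro ⟨hb, hc, hd⟩
    exact ⟨⟨List.mem_of_mem_take hb, List.mem_of_mem_take hc⟩, List.mem_of_mem_take hd⟩
  · rintro ⟨⟨hb, hc⟩, hd⟩
    have := hnD x hx ⟨hb, hc, hd⟩
    tauto

theorem same_elements4_changed : Claim_changed_same_elements4 := by
  unfold Claim_changed_same_elements4; decide

theorem same_elements4_tight : Claim_exact_same_elements4 := by
  intro a b c d _ hpre hD
  obtain ⟨x0, hx0, hfull, hnot⟩ := hD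
  rw [same_elements4_char a b c d hpre]
  unfold same_elements4_alt
  intro heq
  have hlen := congrArg List.length heq
  have hp : (fun x => b.contains x && c.contains x && d.contains x) x0 = true := by
    simp [List.contains_eq_mem, hfull.1, hfull.2.1, hfull.2.2]
  have hq : (fun x => (b.take a.length).contains x &&
      ((c.take a.length).contains x && (d.take a.length).contains x)) x0 = false := by
    by_contra hcon
    rw [Bool.not_eq_false] at hcon
    simp only [Bool.and_eq_true, List.contains_eq_mem, decide_eq_true_eq] at hcon
    exact hnot ⟨hcon.1, hcon.2.1, hcon.2.2⟩
  have := length_filter_lt_of_witness a _ _ (fun x _ => take_pred_imp a b c d x) x0 hx0 hp hq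
  omega
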